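-- pv_equiv track=rewrite | github.com/KusumanchiArun29/contract-risk-analyzer | core/risk_engine.py | calculate_overall_risk
-- ===== SOURCE A (Python) =====
-- RISK_SCORES = {
--     "HIGH": 3,
--     "MEDIUM": 2,
--     "LOW": 1
-- }
--
-- def calculate_overall_risk(clauses):
--     total = 0
--     for c in clauses:
--         total += RISK_SCORES[c["risk"]]
--
--     max_score = len(clauses) * 3
--     percentage = int((total / max_score) * 100) if clauses else 0
--
--     if percentage >= 65:
--         level = "HIGH"
--     elif percentage >= 40:
--         level = "MEDIUM"
--     else:
--         level = "LOW"
--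
--     return percentage, level
-- ===== SOURCE B (Python) =====
-- RISK_SCORES = {
--     "HIGH": 3,
--     "MEDIUM": 2,
--     "LOW": 1
-- }
--
-- LEVELS = [(65, "HIGH"), (40, "MEDIUM"), (0, "LOW")]
--
-- def calculate_overall_risk(clauses):
--     # empty input handled up front, then two filtered counts instead of a running sum
--     if not clauses:
--         return 0, "LOW"
--     high = sum(1 for c in clauses if c["risk"] == "HIGH")
--     medium = sum(1 for c in clauses if c["risk"] == "MEDIUM")
--     low = len(clauses) - high - medium
--     total = 3 * high + 2 * medium + low
--     percentage = int(total / (len(clauses) * 3) * 100)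
--     return percentage, next(lvl for th, lvl in LEVELS if percentage >= th)
-- ===== Notes on version B (the rewrite author's own statement) =====
-- stated objective: alternative
-- what changed: B replaces A's single running-sum loop with staged passes: an early return for the empty list, two filtered counts of the HIGH and MEDIUM categories (LOW by subtraction), a closed-form weighted total 3*high+2*medium+low, and a threshold-table scan for the level instead of the if/elif cascade.
import Mathlib
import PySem

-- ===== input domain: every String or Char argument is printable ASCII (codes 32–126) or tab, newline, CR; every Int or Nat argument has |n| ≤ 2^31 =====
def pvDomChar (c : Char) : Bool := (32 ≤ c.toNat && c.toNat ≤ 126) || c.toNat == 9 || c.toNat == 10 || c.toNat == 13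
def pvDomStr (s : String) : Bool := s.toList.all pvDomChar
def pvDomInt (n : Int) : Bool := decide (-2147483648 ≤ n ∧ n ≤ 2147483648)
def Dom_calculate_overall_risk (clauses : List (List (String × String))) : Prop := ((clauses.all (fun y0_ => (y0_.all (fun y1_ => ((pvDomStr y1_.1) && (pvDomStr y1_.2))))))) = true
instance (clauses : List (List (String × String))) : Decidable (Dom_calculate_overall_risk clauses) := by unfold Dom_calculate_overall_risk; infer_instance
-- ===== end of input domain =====

-- B replaces A's single running-sum loop with staged passes: early empty return, two filtered
-- category counts, a closed-form weighted total and a threshold-table scan for the level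
-- (objective: alternative decomposition, same cost).

-- ===== shared helper: exact integer model of the Python float expression
-- `int((total / max_score) * 100)` (both sources contain this very expression) =====

-- round-to-nearest, ties-to-even, of the rational a / b (a b : Nat)
def pvRne (a b : Nat) : Nat :=
  let q := a / b
  let r := a % b
  if 2 * r < b then q
  else if b < 2 * r then q + 1
  else if q % 2 = 0 then q else q + 1

-- smallest k with target ≤ x * 2^k (0 if never reached within fuel)
def pvFindK : Nat → Nat → Nat → Nat
  | 0, _, _ => 0
  | fuel + 1, x, target => if target ≤ x then 0 else pvFindK fuel (2 * x) target + 1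

-- smallest j with a / 2^j < 2^53
def pvFindJ : Nat → Nat → Nat
  | 0, _ => 0
  | fuel + 1, a => if a < 2 ^ 53 then 0 else pvFindJ fuel (a / 2) + 1

-- exact model of CPython's `int((t / m) * 100)` for 0 ≤ t ≤ m, 0 < m (IEEE-754 binary64,
-- round-to-nearest-even on the division and on the multiplication, then truncation)
def pvPct (t m : Int) : Int :=
  let tn := t.toNat
  let mn := m.toNat
  let k := pvFindK 4096 tn (2 ^ 52 * mn)
  let sig := pvRne (tn * 2 ^ k) mn          -- t/m as a double: sig / 2^k
  let a2 := sig * 100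
  let j := pvFindJ 64 a2
  let sig2 := pvRne a2 (2 ^ j)              -- (t/m)*100 as a double: sig2 * 2^j / 2^k
  ((sig2 * 2 ^ j) / 2 ^ k : Nat)

-- ===== PORT A =====
def pvRiskScores : PySem.Dict String Int :=
  PySem.Dict.ofList [("HIGH", 3), ("MEDIUM", 2), ("LOW", 1)]

def calculate_overall_risk (clauses : List (List (String × String))) : Int × String :=
  -- total = 0; for c in clauses: total += RISK_SCORES[c["risk"]]
  -- (lookups that would raise KeyError in Python default to ""/0 here; Pre_ excludes those inputs)
  let total : Int := clauses.foldl
    (fun t c => t + (pvRiskScores.get? (((PySem.Dict.mk c).get? "risk").getD "")).getD 0) 0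
  let max_score : Int := (clauses.length : Int) * 3
  let percentage : Int := if clauses.isEmpty then 0 else pvPct total max_score
  let level : String := if percentage ≥ 65 then "HIGH" else if percentage ≥ 40 then "MEDIUM" else "LOW"
  (percentage, level)

-- ===== PORT B =====
def pvLevels : List (Int × String) := [(65, "HIGH"), (40, "MEDIUM"), (0, "LOW")]

def calculate_overall_risk_alt (clauses : List (List (String × String))) : Int × String :=
  if clauses.isEmpty then (0, "LOW")
  else
    -- c["risk"]; a missing key (KeyError in Python) defaults to "" here, outside Pre_
    let risk := fun (c : List (String × String)) => ((PySem.Dict.mk c).get? "risk").getD ""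
    let high : Int := ((clauses.filter (fun c => risk c == "HIGH")).length : Int)
    let medium : Int := ((clauses.filter (fun c => risk c == "MEDIUM")).length : Int)
    let low : Int := (clauses.length : Int) - high - medium
    let total : Int := 3 * high + 2 * medium + low
    let percentage : Int := pvPct total ((clauses.length : Int) * 3)
    -- next(lvl for th, lvl in LEVELS if percentage >= th); the last threshold 0 always matches
    -- since percentage ≥ 0, so the getD default is unreachable
    let level : String := ((pvLevels.find? (fun tl => percentage ≥ tl.1)).map Prod.snd).getD "LOW"
    (percentage, level)

-- ===== PRECONDITION & SPEC =====
-- Pre_ excludes exactly the inputs where Python A raises KeyError: a clause without a "risk"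
-- key, or whose risk value is not one of "HIGH"/"MEDIUM"/"LOW".
def Pre_calculate_overall_risk (clauses : List (List (String × String))) : Prop :=
  clauses.all (fun c => (((PySem.Dict.mk c).get? "risk").getD "") ∈ ["HIGH", "MEDIUM", "LOW"]
      && ((PySem.Dict.mk c).get? "risk").isSome) = true
instance (clauses : List (List (String × String))) : Decidable (Pre_calculate_overall_risk clauses) := by unfold Pre_calculate_overall_risk; infer_instance

def pvWitness_calculate_overall_risk : (List (List (String × String))) :=
  [[("risk", "HIGH")], [("risk", "LOW"), ("text", "x")]]

def Spec_calculate_overall_risk (clauses : List (List (String × String))) (out : Int × String) : Prop := out = calculate_overall_risk_alt clauses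
instance (clauses : List (List (String × String))) (out : Int × String) : Decidable (Spec_calculate_overall_risk clauses out) := by unfold Spec_calculate_overall_risk; infer_instance

-- ===== CLAIM =====
def Claim_equal_calculate_overall_risk : Prop := ∀ (clauses : List (List (String × String))), Dom_calculate_overall_risk clauses → Pre_calculate_overall_risk clauses → Spec_calculate_overall_risk clauses (calculate_overall_risk clauses)

-- ===== LEMMAS AND PROOFS =====

-- A's running score sum over risks that are all HIGH/MEDIUM/LOW equals B's closed form
-- 3·(#HIGH) + 2·(#MEDIUM) + (len − #HIGH − #MEDIUM)
theorem pv_total_eq (rs : List String)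
    (h : ∀ r ∈ rs, r = "HIGH" ∨ r = "MEDIUM" ∨ r = "LOW") :
    rs.foldl (fun t r => t + (pvRiskScores.get? r).getD 0) 0
      = 3 * (rs.countP (· == "HIGH") : Int) + 2 * (rs.countP (· == "MEDIUM") : Int)
        + ((rs.length : Int) - (rs.countP (· == "HIGH") : Int) - (rs.countP (· == "MEDIUM") : Int)) := by
  rw [PySem.List.foldl_add]
  induction rs with
  | nil => simp
  | cons r rs ih =>
    have hr := h r (List.mem_cons_self ..)
    have ih' := ih (fun x hx => h x (List.mem_cons_of_mem _ hx))
    simp only [List.map_cons, List.sum_cons, List.countP_cons, List.length_cons] at *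
    have hH : (pvRiskScores.get? "HIGH").getD 0 = 3 := by decide
    have hM : (pvRiskScores.get? "MEDIUM").getD 0 = 2 := by decide
    have hL : (pvRiskScores.get? "LOW").getD 0 = 1 := by decide
    rcases hr with hr | hr | hr <;> subst hr <;>
      simp only [hH, hM, hL,
        show (("HIGH":String) == "HIGH") = true from by decide,
        show (("MEDIUM":String) == "MEDIUM") = true from by decide,
        show (("HIGH":String) == "MEDIUM") = false from by decide,
        show (("MEDIUM":String) == "HIGH") = false from by decide,
        show (("LOW":String) == "HIGH") = false from by decide,
        show (("LOW":String) == "MEDIUM") = false from by decide,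
        if_true] <;>
      push_cast at ih' ⊢ <;> omega

-- B's threshold-table scan equals A's if/elif cascade, for any nonnegative percentage
theorem pv_level_eq (p : Int) (hp : 0 ≤ p) :
    ((pvLevels.find? (fun tl => p ≥ tl.1)).map Prod.snd).getD "LOW"
      = (if p ≥ 65 then "HIGH" else if p ≥ 40 then "MEDIUM" else "LOW") := by
  by_cases h1 : p ≥ 65
  · simp [pvLevels, h1]
  · by_cases h2 : p ≥ 40 <;> simp [pvLevels, List.find?, h1, h2, hp]

theorem pv_pct_nonneg (t m : Int) : 0 ≤ pvPct t m := by
  unfold pvPct; positivity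

-- ===== VERDICT =====
theorem calculate_overall_risk_spec : Claim_equal_calculate_overall_risk := by
  intro clauses _ hpre
  unfold Spec_calculate_overall_risk calculate_overall_risk calculate_overall_risk_alt
  by_cases he : clauses.isEmpty
  · simp [he]
  · simp only [he, if_neg, Bool.false_eq_true, not_false_eq_true]
    have hall : ∀ r ∈ clauses.map (fun c => ((PySem.Dict.mk c).get? "risk").getD ""),
        r = "HIGH" ∨ r = "MEDIUM" ∨ r = "LOW" := by
      intro r hr
      rcases List.mem_map.mp hr with ⟨c, hc, rfl⟩
      unfold Pre_calculate_overall_risk at hpre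
      have := (List.all_eq_true.mp hpre) c hc
      simp at this
      rcases this with ⟨h1 | h1 | h1, _⟩ <;> simp [h1]
    have htot := pv_total_eq _ hall
    rw [List.foldl_map] at htot
    have hcnt : ∀ s : String,
        (clauses.map (fun c => ((PySem.Dict.mk c).get? "risk").getD "")).countP (· == s)
          = (clauses.filter (fun c => (((PySem.Dict.mk c).get? "risk").getD "") == s)).length := by
      intro s
      rw [List.countP_map, ← List.countP_eq_length_filter]
      rfl
    rw [hcnt, hcnt, List.length_map] at htot
    rw [htot, pv_level_eq _ (pv_pct_nonneg _ _)]
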